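-- pv_equiv track=rewrite | github.com/DanKotlyar/SERPENT-INPUT-GENERATOR | serpentGenerator/functions/builders.py | __isHexagonal
-- ===== SOURCE A (Python) =====
-- def __isHexagonal(map):
--     nrows = len(map)
--     isHex = False
--     hasChangedDir = False
--     hasChangedCount = 0
--     if ((nrows % 2) != 1):
--         isHex = False
--         return isHex
--     for i in range(0, nrows-1):
--         curLen = len(map[i])
--         nextLen = len(map[i+1])
--         nextCurDiff = nextLen - curLen
--         if (hasChangedDir & (nextCurDiff > 0)):
--             hasChangedCount = hasChangedCount + 1
--         if ((not hasChangedDir) & (nextCurDiff < 0)):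
--             hasChangedDir = True
--         if (hasChangedCount > 1):
--             isHex = False
--             return isHex
--         if ((not hasChangedDir) & (nextCurDiff == 1)):
--             isHex = True
--         elif (hasChangedDir & (nextCurDiff == -1)):
--             isHex = True
--         else:
--             isHex = False
--             return isHex
--     if not hasChangedDir:
--         isHex = False
--     return isHex
-- ===== SOURCE B (Python) =====
-- def __isHexagonal(map):
--     # Reconstruct-and-compare: the only candidate hexagonal profile is determined
--     # by the first row length and the peak position; build it and compare wholesale.
--     n = len(map)
--     if n % 2 != 1:
--         return False
--     lengths = [len(r) for r in map]
--     base = lengths[0]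
--     p = lengths.index(max(lengths))
--     if p == n - 1:
--         return False
--     return lengths == [base + min(i, 2 * p - i) for i in range(n)]
-- ===== Notes on version B (the rewrite author's own statement) =====
-- stated objective: alternative
-- what changed: Replaces A's flag-driven left-to-right scan of adjacent row-length differences by a reconstruct-and-compare algorithm: locate the peak with index(max(lengths)), rebuild the unique candidate hexagonal profile as the closed-form comprehension [base + min(i, 2*p - i) for i in range(n)], and compare it wholesale against the actual lengths.
import Mathlib
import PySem

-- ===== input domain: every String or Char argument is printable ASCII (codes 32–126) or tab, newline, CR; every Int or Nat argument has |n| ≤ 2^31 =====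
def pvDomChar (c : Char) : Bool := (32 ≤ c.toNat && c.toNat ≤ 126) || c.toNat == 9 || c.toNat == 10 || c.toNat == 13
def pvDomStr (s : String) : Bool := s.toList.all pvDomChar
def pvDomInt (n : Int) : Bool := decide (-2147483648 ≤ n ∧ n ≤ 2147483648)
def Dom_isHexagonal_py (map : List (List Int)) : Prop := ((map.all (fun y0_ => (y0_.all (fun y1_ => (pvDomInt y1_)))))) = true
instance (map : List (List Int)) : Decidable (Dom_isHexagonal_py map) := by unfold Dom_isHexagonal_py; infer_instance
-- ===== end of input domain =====

-- B replaces A's flag-driven scan of adjacent differences by a reconstruct-and-compare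
-- algorithm (peak via max/index, rebuild the unique candidate profile, compare); objective: alternative.

-- ===== PORT A =====
-- A's for-loop over i with map[i], map[i+1] ported as the obvious structural
-- recursion over adjacent rows, carrying the same state (hasChangedDir, hasChangedCount).
def isHexLoop : List (List Int) → Bool → Int → Bool
  | cur :: next :: rest, hasChangedDir, hasChangedCount =>
    let curLen : Int := cur.length
    let nextLen : Int := next.length
    let nextCurDiff := nextLen - curLen
    let hasChangedCount := if hasChangedDir && decide (nextCurDiff > 0) then hasChangedCount + 1 else hasChangedCount
    let hasChangedDir := if !hasChangedDir && decide (nextCurDiff < 0) then true else hasChangedDir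
    if hasChangedCount > 1 then false
    else if !hasChangedDir && decide (nextCurDiff = 1) then isHexLoop (next :: rest) hasChangedDir hasChangedCount
    else if hasChangedDir && decide (nextCurDiff = -1) then isHexLoop (next :: rest) hasChangedDir hasChangedCount
    else false
  | _, hasChangedDir, _ =>
    -- loop finished without an early return: isHex is True iff at least one
    -- iteration ran and the last one took a True branch; then 'if not hasChangedDir: isHex = False'
    if !hasChangedDir then false else true

def isHexagonal_py (map : List (List Int)) : Bool :=
  if ¬ ((map.length : Int) % 2 = 1) then false
  else isHexLoop map false 0

-- ===== PORT B =====
-- Transliteration of Source B: lengths, base = lengths[0] (nonempty: the length is odd),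
-- p = lengths.index(max(lengths)), guard p == n-1, then compare against the
-- comprehension [base + min(i, 2*p - i) for i in range(n)].
def isHexagonal_py_alt (map : List (List Int)) : Bool :=
  let n : Int := map.length
  if ¬ (n % 2 = 1) then false
  else
    let lengths : List Int := map.map (fun r => (r.length : Int))
    let base : Int := lengths.headD 0      -- lengths[0]; safe: lengths nonempty here
    match PySem.List.max? lengths (fun y => y) with
    | none => false                        -- unreachable: lengths nonempty
    | some mx =>
      match PySem.List.index? lengths mx with
      | none => false                      -- unreachable: mx ∈ lengths
      | some p =>
        if (p : Int) = n - 1 then false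
        else decide (lengths = (PySem.List.pyRange 0 n 1).map (fun i => base + min i (2 * (p : Int) - i)))

-- ===== PRECONDITION & SPEC =====
def Spec_isHexagonal_py (map : List (List Int)) (out : Bool) : Prop := out = isHexagonal_py_alt map
instance (map : List (List Int)) (out : Bool) : Decidable (Spec_isHexagonal_py map out) := by unfold Spec_isHexagonal_py; infer_instance

-- ===== CLAIM (what is proved, stated in full; the proofs are below) =====
def Claim_equal_isHexagonal_py : Prop := ∀ (map : List (List Int)), Dom_isHexagonal_py map → Spec_isHexagonal_py map (isHexagonal_py map)

-- ===== LEMMAS AND PROOFS =====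

-- consecutive differences of a list (proof-side mirror of what A's loop consumes)
def dif (L : List Int) : List Int := List.zipWith (fun a b => b - a) L L.tail

theorem dif_cons (x y : Int) (t : List Int) : dif (x :: y :: t) = (y - x) :: dif (y :: t) := by
  simp [dif]

-- phase view of A's state machine (proof helpers only)
def hexPhase2 : List Int → Bool
  | [] => true
  | d :: rest => if d ≠ -1 then false else hexPhase2 rest
def hexPhase1 : List Int → Bool
  | [] => false
  | d :: rest => if d = 1 then hexPhase1 rest else hexPhase2 (d :: rest)

-- after the direction change A's loop accepts exactly a run of -1 diffs, for any count
theorem isHexLoop_changed (xs : List (List Int)) : ∀ c : Int, c ≤ 1 →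
    isHexLoop xs true c = hexPhase2 (dif (xs.map (fun r => (r.length : Int)))) := by
  induction xs with
  | nil => intro c _; simp [isHexLoop, dif, hexPhase2]
  | cons x tail ih =>
    intro c hc
    cases tail with
    | nil => simp [isHexLoop, dif, hexPhase2]
    | cons y rest =>
      simp only [List.map_cons, dif_cons]
      by_cases hd : ((y.length : Int) - (x.length : Int)) = -1
      · have h1 : ¬ ((y.length : Int) - (x.length : Int) > 0) := by omega
        have h2 : ¬ (c > 1) := by omega
        simpa [isHexLoop, hexPhase2, hd, h2] using ih c hc
      · by_cases hpos : ((y.length : Int) - (x.length : Int)) > 0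
        · by_cases hcc : c + 1 > 1 <;> simp [isHexLoop, hexPhase2, hd]
        · by_cases hcc : c > 1 <;> simp [isHexLoop, hexPhase2, hd]

theorem isHexLoop_unchanged (xs : List (List Int)) :
    isHexLoop xs false 0 = hexPhase1 (dif (xs.map (fun r => (r.length : Int)))) := by
  induction xs with
  | nil => simp [isHexLoop, dif, hexPhase1]
  | cons x tail ih =>
    cases tail with
    | nil => simp [isHexLoop, dif, hexPhase1]
    | cons y rest =>
      simp only [List.map_cons, dif_cons]
      set d : Int := (y.length : Int) - (x.length : Int) with hdd
      by_cases h1 : d = 1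
      · have : ¬ (d < 0) := by omega
        simp [isHexLoop, hexPhase1, h1, ← hdd, ih]
      · by_cases hneg : d < 0
        · by_cases hm1 : d = -1
          · have hch := isHexLoop_changed (y :: rest) 0 (by omega)
            simp only [List.map_cons] at hch
            simp [isHexLoop, hexPhase1, hexPhase2, hm1, ← hdd, hch]
          · simp [isHexLoop, hexPhase1, hexPhase2, h1, hneg, hm1, ← hdd]
        · have hm1 : ¬ (d = -1) := by omega
          simp [isHexLoop, hexPhase1, hexPhase2, h1, hneg, hm1, ← hdd]

-- the hexagonal profile: k ascending (+1) steps then m descending (-1) steps from x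
def pat (x : Int) : Nat → Nat → List Int
  | 0, 0 => [x]
  | 0, m+1 => x :: pat (x-1) 0 m
  | k+1, m => x :: pat (x+1) k m

theorem length_pat (k m : Nat) : ∀ x, (pat x k m).length = k + m + 1 := by
  induction k with
  | zero =>
    induction m with
    | zero => intro x; simp [pat]
    | succ m ih => intro x; simp only [pat, List.length_cons, ih]; omega
  | succ k ih => intro x; simp only [pat, List.length_cons, ih]; omega

theorem headD_pat (x : Int) (k m : Nat) : (pat x k m).headD 0 = x := by
  cases k <;> cases m <;> simp [pat]

theorem foldl_max_desc (m : Nat) : ∀ x a : Int, (pat x 0 m).foldl max a = max a x := by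
  induction m with
  | zero => intro x a; simp [pat]
  | succ m ih => intro x a; simp only [pat, List.foldl_cons, ih]; omega

theorem foldl_max_pat (k m : Nat) : ∀ x a : Int, (pat x k m).foldl max a = max a (x + k) := by
  induction k with
  | zero => intro x a; simpa using foldl_max_desc m x a
  | succ k ih =>
    intro x a
    have := ih (x+1) (max a x)
    simp only [pat, List.foldl_cons, this]
    omega

theorem max?_pat (x : Int) (k m : Nat) :
    PySem.List.max? (pat x k m) (fun y => y) = some (x + k) := by
  match k, m with
  | 0, 0 => simp [pat, PySem.List.max?_id_cons]
  | 0, m+1 =>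
    rw [pat, PySem.List.max?_id_cons, foldl_max_desc]
    exact congrArg some (by omega)
  | k+1, m =>
    rw [pat, PySem.List.max?_id_cons, foldl_max_pat]
    exact congrArg some (by omega)

theorem index?_pat (k : Nat) : ∀ (x : Int) (m : Nat),
    PySem.List.index? (pat x k m) (x + k) = some k := by
  induction k with
  | zero =>
    intro x m
    cases m with
    | zero => simp [pat, PySem.List.index?_eq_idxOf?, List.idxOf?]
    | succ m => simpa [pat] using PySem.List.index?_cons_self x (pat (x-1) 0 m)
  | succ k ih =>
    intro x m
    have hne : x ≠ x + (k+1 : Nat) := by omega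
    have h2 : (x + (k+1 : Nat) : Int) = (x + 1) + k := by omega
    rw [pat, h2, PySem.List.index?_cons_of_ne _ (by rw [← h2]; exact hne), ih (x+1) m]
    rfl

-- the comprehension [x + min(i, 2*k - i) for i in range(k+m+1)] IS pat x k m
theorem range_map_eq_pat (k m : Nat) : ∀ x : Int,
    (List.range (k+m+1)).map (fun i : Nat => x + min (i : Int) (2*(k:Int) - i)) = pat x k m := by
  induction k with
  | zero =>
    induction m with
    | zero => intro x; simp [pat]
    | succ m ih =>
      intro x
      rw [show 0+(m+1)+1 = (0+m+1)+1 by omega, List.range_succ_eq_map]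
      simp only [List.map_cons, List.map_map]
      rw [pat]
      refine List.cons_eq_cons.mpr ⟨by simp, ?_⟩
      rw [← ih (x-1)]
      apply List.map_congr_left
      intro i _
      simp [Function.comp]
      omega
  | succ k ih =>
    intro x
    rw [show (k+1)+m+1 = (k+m+1)+1 by omega, List.range_succ_eq_map]
    simp only [List.map_cons, List.map_map]
    rw [pat]
    refine List.cons_eq_cons.mpr ⟨by simp; omega, ?_⟩
    rw [← ih (x+1)]
    apply List.map_congr_left
    intro i _
    simp [Function.comp]
    omega

-- characterizations of the two phases as pattern equalities
theorem phase2_iff (t : List Int) : ∀ x : Int,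
    hexPhase2 (dif (x :: t)) = true ↔ ∃ m, x :: t = pat x 0 m := by
  induction t with
  | nil =>
    intro x
    constructor
    · intro _; exact ⟨0, by simp [pat]⟩
    · intro _; simp [dif, hexPhase2]
  | cons y t ih =>
    intro x
    rw [dif_cons]
    by_cases h : y - x = -1
    · have hy : y = x - 1 := by omega
      simp only [hexPhase2, h]
      rw [if_neg (by simp), ih y]
      constructor
      · rintro ⟨m, hm⟩
        exact ⟨m+1, by rw [pat, ← hy, ← hm]⟩
      · rintro ⟨m, hm⟩
        cases m with
        | zero => simp [pat] at hm
        | succ m =>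
          rw [pat] at hm
          have h2 : y :: t = pat (x-1) 0 m := (List.cons_eq_cons.mp hm).2
          refine ⟨m, ?_⟩
          rw [hy]
          rw [hy] at h2
          exact h2
    · constructor
      · intro hh; simp [hexPhase2, h] at hh
      · rintro ⟨m, hm⟩
        cases m with
        | zero => simp [pat] at hm
        | succ m =>
          rw [pat] at hm
          have h2 : y :: t = pat (x-1) 0 m := (List.cons_eq_cons.mp hm).2
          have hh : y = (pat (x-1) 0 m).headD 0 := by rw [← h2]; rfl
          rw [headD_pat] at hh
          omega

theorem phase1_iff (t : List Int) : ∀ x : Int,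
    hexPhase1 (dif (x :: t)) = true ↔ ∃ k m, 1 ≤ m ∧ x :: t = pat x k m := by
  induction t with
  | nil =>
    intro x
    simp only [dif]
    constructor
    · intro h; simp [hexPhase1] at h
    · rintro ⟨k, m, hm, hp⟩
      have := length_pat k m x
      rw [← hp] at this
      simp at this; omega
  | cons y t ih =>
    intro x
    rw [dif_cons]
    by_cases h1 : y - x = 1
    · have hy : y = x + 1 := by omega
      simp only [hexPhase1, if_pos h1]
      rw [ih y]
      constructor
      · rintro ⟨k, m, hm, hp⟩
        exact ⟨k+1, m, hm, by rw [pat, ← hy, ← hp]⟩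
      · rintro ⟨k, m, hm, hp⟩
        cases k with
        | zero =>
          cases m with
          | zero => simp [pat] at hp
          | succ m =>
            rw [pat] at hp
            have h2 : y :: t = pat (x-1) 0 m := (List.cons_eq_cons.mp hp).2
            have hh : y = (pat (x-1) 0 m).headD 0 := by rw [← h2]; rfl
            rw [headD_pat] at hh
            omega
        | succ k =>
          rw [pat] at hp
          have h2 : y :: t = pat (x+1) k m := (List.cons_eq_cons.mp hp).2
          refine ⟨k, m, hm, ?_⟩
          rw [hy]
          rw [hy] at h2
          exact h2
    · have hstep : hexPhase1 ((y - x) :: dif (y :: t)) = hexPhase2 ((y - x) :: dif (y :: t)) := by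
        simp [hexPhase1, h1]
      rw [hstep, ← dif_cons, phase2_iff (y :: t) x]
      constructor
      · rintro ⟨m, hm⟩
        refine ⟨0, m, ?_, hm⟩
        cases m with
        | zero => simp [pat] at hm
        | succ m => omega
      · rintro ⟨k, m, hm, hp⟩
        cases k with
        | zero => exact ⟨m, hp⟩
        | succ k =>
          rw [pat] at hp
          have h2 : y :: t = pat (x+1) k m := (List.cons_eq_cons.mp hp).2
          have hh : y = (pat (x+1) k m).headD 0 := by rw [← h2]; rfl
          rw [headD_pat] at hh
          omega

-- B's core (after the parity guard) is true exactly on the hexagonal patterns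
theorem alt_core_iff (x : Int) (t : List Int) (n : Int) (hn : n = (x :: t : List Int).length) :
    (match PySem.List.max? (x :: t) (fun y => y) with
     | none => false
     | some mx =>
       match PySem.List.index? (x :: t) mx with
       | none => false
       | some p =>
         if (p : Int) = n - 1 then false
         else decide ((x :: t : List Int) =
           (PySem.List.pyRange 0 n 1).map (fun i => (x :: t : List Int).headD 0 + min i (2 * (p : Int) - i)))) = true
    ↔ ∃ k m, 1 ≤ m ∧ x :: t = pat x k m := by
  constructor
  · intro hb
    split at hb
    · exact absurd hb (by simp)
    rename_i mx hmx
    split at hb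
    · exact absurd hb (by simp)
    rename_i p hp
    split at hb
    · exact absurd hb (by simp)
    rename_i hlast
    have heq := of_decide_eq_true hb
    have hplen : p < (x :: t).length := by
      rcases (PySem.List.index?_eq_some_iff (x :: t) mx p).mp hp with ⟨pre, suf, hsplit, hlen, _⟩
      rw [hsplit]; simp; omega
    have hm1 : 1 ≤ (x :: t).length - p - 1 := by
      have : (p : Int) ≠ ((x :: t).length : Int) - 1 := by rw [← hn]; exact hlast
      omega
    set m := (x :: t).length - p - 1 with hmdef
    have hnpm : (x :: t).length = p + m + 1 := by omega
    refine ⟨p, m, hm1, ?_⟩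
    have hexp : (PySem.List.pyRange 0 n 1).map
        (fun i => (x :: t : List Int).headD 0 + min i (2 * (p : Int) - i)) = pat x p m := by
      rw [hn, PySem.List.pyRange_one]
      simp only [sub_zero, Int.toNat_natCast, List.map_map]
      rw [hnpm, ← range_map_eq_pat p m x]
      apply List.map_congr_left
      intro i _
      simp [Function.comp]
    exact heq.trans hexp
  · rintro ⟨k, m, hm, hp⟩
    rw [hp]
    simp only [max?_pat, index?_pat]
    have hn' : n = (k : Int) + m + 1 := by
      rw [hn, hp]; simp [length_pat]
    rw [if_neg (by omega)]
    apply decide_eq_true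
    rw [headD_pat, hn',
      show ((k : Int) + m + 1 = ((k + m + 1 : Nat) : Int)) by push_cast; ring,
      PySem.List.pyRange_one]
    simp only [sub_zero, Int.toNat_natCast, List.map_map]
    rw [← range_map_eq_pat k m x]
    apply List.map_congr_left
    intro i _
    simp

-- ===== VERDICT (by name: the statement is the Claim_ definition above) =====
theorem isHexagonal_py_spec : Claim_equal_isHexagonal_py := by
  intro map _
  unfold Spec_isHexagonal_py isHexagonal_py isHexagonal_py_alt
  by_cases hp : ((map.length : Int) % 2 = 1)
  · simp only [hp, not_true_eq_false, if_false]
    cases map with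
    | nil => simp at hp
    | cons r rs =>
      rw [isHexLoop_unchanged]
      simp only [List.map_cons]
      rw [Bool.eq_iff_iff,
        phase1_iff (rs.map (fun r => (r.length : Int))) ((r.length : Int))]
      exact (alt_core_iff (r.length : Int) (rs.map (fun r => (r.length : Int)))
          ((r :: rs).length : Int) (by simp)).symm
  · simp [hp]
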